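-- pv_equiv track=rewrite | github.com/jegstar/IB-CS-Textbook | Algorithmic Thinking/other_algorithms.py | generateArray
-- ===== SOURCE A (Python) =====
-- def generateArray(height, width, type='integer'):
--     output = []
--     count = 0
--     for i in range(height):
--         row = []
--         for j in range(width):
--             if type == 'letter':
--                 row.append(chr(ord('a') + count))
--             elif type == 'integer':
--                 row.append(count)
--             count += 1
--         output.append(row)
--     return output
-- ===== SOURCE B (Python) =====
-- def generateArray(height, width, type='integer'):
--     # Staged: build the flat sequence once, then chunk it into rows by slicing.
--     if type == 'integer':
--         flat = list(range(height * width))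
--     elif type == 'letter':
--         flat = [chr(ord('a') + k) for k in range(height * width)]
--     else:
--         flat = []
--     return [flat[i * width:(i + 1) * width] for i in range(height)]
-- ===== Notes on version B (the rewrite author's own statement) =====
-- stated objective: faster
-- what changed: Two-stage algorithm: instead of nested loops threading a running count, B builds the whole flat sequence once (list(range(height*width)) / letters) and then chunks it into rows by slicing flat[i*width:(i+1)*width]; unknown types slice an empty flat list, yielding height empty rows.
-- outside the precondition, e.g. on generateArray(1, 3, 'letter'): A returns [['a', 'b', 'c']], B returns [['a', 'b', 'c']]
import Mathlib
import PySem

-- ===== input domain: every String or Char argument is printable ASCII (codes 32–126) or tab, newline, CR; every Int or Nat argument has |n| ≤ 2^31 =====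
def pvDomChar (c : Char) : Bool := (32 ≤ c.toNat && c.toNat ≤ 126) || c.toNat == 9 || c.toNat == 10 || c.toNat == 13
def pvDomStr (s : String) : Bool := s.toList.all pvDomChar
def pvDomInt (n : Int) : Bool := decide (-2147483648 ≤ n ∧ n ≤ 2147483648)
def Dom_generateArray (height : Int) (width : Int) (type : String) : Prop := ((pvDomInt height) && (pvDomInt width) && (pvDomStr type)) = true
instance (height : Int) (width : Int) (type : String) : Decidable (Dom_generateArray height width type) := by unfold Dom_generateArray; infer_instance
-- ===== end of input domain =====

-- B replaces A's nested counting loops by a two-stage algorithm: build the flat sequence once,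
-- then chunk it into rows by slicing (same cost, different structure); for type='letter' Python
-- returns strings, not ints, so those inputs are outside Pre_ (the ports carry char codes there).

-- ===== PORT A =====
-- literal transliteration of A: nested for-loops over range(height)/range(width)
-- threading the (row, count) / (output, count) state; the 'letter' branch appends
-- chr(ord('a')+count) in Python — a string, not an Int — so the port carries the char
-- CODE 97+count there; those inputs are excluded by Pre_generateArray.
def generateArray (height : Int) (width : Int) (type : String) : List (List Int) :=
  let res := (PySem.List.pyRange 0 height 1).foldl
    (fun (st : List (List Int) × Int) (_i : Int) =>
      let inner := (PySem.List.pyRange 0 width 1).foldl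
        (fun (rc : List Int × Int) (_j : Int) =>
          (if type = "letter" then rc.1 ++ [97 + rc.2]
           else if type = "integer" then rc.1 ++ [rc.2]
           else rc.1,
           rc.2 + 1)) ([], st.2)
      (st.1 ++ [inner.1], inner.2)) ([], 0)
  res.1

-- ===== PORT B =====
-- literal transliteration of Source B: build the flat value sequence once, then chunk it into
-- rows with the slice flat[i*width:(i+1)*width] (the 'letter' branch carries char codes 97+k).
def generateArray_alt (height : Int) (width : Int) (type : String) : List (List Int) :=
  let flat : List Int :=
    if type = "integer" then PySem.List.pyRange 0 (height * width) 1
    else if type = "letter" then (PySem.List.pyRange 0 (height * width) 1).map (fun k => 97 + k)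
    else []
  (PySem.List.pyRange 0 height 1).map (fun i =>
    PySem.List.slice flat (some (i * width)) (some ((i + 1) * width)))

-- ===== PRECONDITION & SPEC =====
-- Pre_ excludes type = "letter": there Python A returns lists of one-character STRINGS
-- (chr(ord('a')+count)), not values of the declared type List (List Int).
def Pre_generateArray (_height : Int) (_width : Int) (type : String) : Prop := type ≠ "letter"
instance (height : Int) (width : Int) (type : String) : Decidable (Pre_generateArray height width type) := by unfold Pre_generateArray; infer_instance
def pvWitness_generateArray : Int × Int × String := (2, 3, "integer")
def Spec_generateArray (height : Int) (width : Int) (type : String) (out : List (List Int)) : Prop := out = generateArray_alt height width type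
instance (height : Int) (width : Int) (type : String) (out : List (List Int)) : Decidable (Spec_generateArray height width type out) := by unfold Spec_generateArray; infer_instance

-- ===== CLAIM (what is proved, stated in full; the proofs are below) =====
def Claim_equal_generateArray : Prop := ∀ (height : Int) (width : Int) (type : String), Dom_generateArray height width type → Pre_generateArray height width type → Spec_generateArray height width type (generateArray height width type)

-- ===== LEMMAS AND PROOFS =====
-- A-side loop shapes
lemma pv_innerInt (l : List Int) (r : List Int) (c : Int) :
    l.foldl (fun (rc : List Int × Int) (_ : Int) => (rc.1 ++ [rc.2], rc.2 + 1)) (r, c)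
      = (r ++ (List.range l.length).map (fun (k : Nat) => c + (k : Int)), c + l.length) := by
  induction l generalizing r c with
  | nil => simp
  | cons x xs ih =>
    rw [List.foldl_cons]
    dsimp only
    rw [ih, List.length_cons, List.range_succ_eq_map, List.map_cons, List.map_map]
    refine Prod.ext ?_ ?_
    · rw [List.append_assoc, List.singleton_append]
      dsimp only
      norm_num
      intro a _
      ring
    · dsimp only
      push_cast; ring

lemma pv_innerOther (l : List Int) (r : List Int) (c : Int) :
    l.foldl (fun (rc : List Int × Int) (_ : Int) => (rc.1, rc.2 + 1)) (r, c)
      = (r, c + l.length) := by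
  induction l generalizing c with
  | nil => simp
  | cons x xs ih => simp [List.foldl_cons, ih]; ring

lemma pv_outerInt (Wn : Nat) (n : Nat) :
    ∀ (acc : List (List Int)) (c : Int),
    (List.range n).foldl
        (fun (st : List (List Int) × Int) (_ : Nat) =>
          (st.1 ++ [(List.range Wn).map (fun (k : Nat) => st.2 + (k : Int))], st.2 + Wn)) (acc, c)
      = (acc ++ (List.range n).map
            (fun (i : Nat) => (List.range Wn).map (fun (k : Nat) => c + (i : Int) * Wn + (k : Int))),
          c + n * Wn) := by
  induction n with
  | zero => simp
  | succ m ih =>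
    intro acc c
    rw [List.range_succ_eq_map, List.foldl_cons, List.foldl_map]
    dsimp only
    rw [ih, List.map_cons, List.map_map]
    refine Prod.ext ?_ ?_
    · rw [List.append_assoc, List.singleton_append]
      dsimp only
      norm_num
      intro a _ b _
      ring
    · dsimp only
      push_cast; ring

lemma pv_outerOther (W : Int) (n : Nat) :
    ∀ (acc : List (List Int)) (c : Int),
    (List.range n).foldl
        (fun (st : List (List Int) × Int) (_ : Nat) => (st.1 ++ [([] : List Int)], st.2 + W)) (acc, c)
      = (acc ++ List.replicate n ([] : List Int), c + n * W) := by
  induction n with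
  | zero => simp
  | succ m ih =>
    intro acc c
    rw [List.range_succ_eq_map, List.foldl_cons, List.foldl_map]
    dsimp only
    rw [ih, List.replicate_succ]
    refine Prod.ext ?_ ?_
    · simp
    · dsimp only
      push_cast; ring

-- B-side: a slice of a 0-based pyRange is a pyRange
lemma pv_slice_pyRange (n lo hi : Int) (h0 : 0 ≤ lo) (h1 : lo ≤ hi) (h2 : hi ≤ n) :
    PySem.List.slice (PySem.List.pyRange 0 n 1) (some lo) (some hi)
      = PySem.List.pyRange lo hi 1 := by
  rw [PySem.List.slice_toNat _ h0 (le_trans h0 h1)]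
  have hd : (PySem.List.pyRange 0 lo 1).length = lo.toNat := by
    simp [PySem.List.length_pyRange_one]
  have ht : (PySem.List.pyRange lo hi 1).length = hi.toNat - lo.toNat := by
    simp [PySem.List.length_pyRange_one]; omega
  rw [PySem.List.pyRange_one_append 0 lo n h0 (le_trans h1 h2),
      PySem.List.pyRange_one_append lo hi n h1 h2]
  rw [← hd, List.drop_left, hd, ← ht, List.take_left]

-- slice of the empty list is empty
lemma pv_slice_nil (a b : Int) :
    PySem.List.slice ([] : List Int) (some a) (some b) = [] := by
  simp [PySem.List.slice]

-- ===== VERDICT (by name: the statement is the Claim_ definition above) =====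
theorem generateArray_spec : Claim_equal_generateArray := by
  intro height width type _ hpre
  unfold Spec_generateArray generateArray generateArray_alt
  simp only [if_neg hpre]
  by_cases hint : type = "integer"
  · rw [if_pos hint]
    simp only [hint, reduceIte]
    rw [PySem.List.pyRange_one 0 height, PySem.List.pyRange_one 0 width]
    simp only [List.foldl_map, List.map_map, zero_add, sub_zero]
    have hin : ∀ (c : Int),
        (List.range width.toNat).foldl
            (fun (rc : List Int × Int) (_ : Nat) => (rc.1 ++ [rc.2], rc.2 + 1)) ([], c)
          = ((List.range width.toNat).map (fun (k : Nat) => c + (k : Int)), c + width.toNat) := by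
      intro c
      have h2 := pv_innerInt ((List.range width.toNat).map (fun (k : Nat) => (k : Int))) [] c
      rw [List.foldl_map] at h2
      simpa using h2
    simp only [hin]
    rw [pv_outerInt width.toNat height.toNat [] 0]
    simp only [List.nil_append]
    apply List.map_congr_left
    intro i hi
    rw [List.mem_range] at hi
    have hh : (0 : Int) < height := by
      by_contra h
      simp [Int.toNat_of_nonpos (le_of_not_gt h)] at hi
    rcases le_or_gt width 0 with hw | hw
    · have hflat : PySem.List.pyRange 0 (height * width) 1 = [] :=
        PySem.List.pyRange_one_eq_nil (by nlinarith)
      rw [Function.comp_apply, hflat, pv_slice_nil]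
      simp [Int.toNat_of_nonpos hw]
    · have hwnat : ((width.toNat : Int)) = width := Int.toNat_of_nonneg hw.le
      have hiw : ((i : Int)) + 1 ≤ height := by
        have : (i : Int) < (height.toNat : Int) := by exact_mod_cast hi
        omega
      rw [Function.comp_apply,
          pv_slice_pyRange (height * width) ((i : Int) * width) (((i : Int) + 1) * width)
            (by positivity) (by nlinarith) (by nlinarith)]
      rw [PySem.List.pyRange_one]
      have : (((i : Int) + 1) * width - (i : Int) * width).toNat = width.toNat := by
        have : ((i : Int) + 1) * width - (i : Int) * width = width := by ring
        rw [this]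
      rw [this]
      apply List.map_congr_left
      intro k _
      rw [hwnat]
      ring
  · rw [if_neg hint]
    simp only [if_neg hint]
    rw [PySem.List.pyRange_one 0 height, PySem.List.pyRange_one 0 width]
    simp only [List.foldl_map, List.map_map, zero_add, sub_zero]
    have hin : ∀ (c : Int),
        (List.range width.toNat).foldl
            (fun (rc : List Int × Int) (_ : Nat) => (rc.1, rc.2 + 1)) ([], c)
          = (([] : List Int), c + width.toNat) := by
      intro c
      have h2 := pv_innerOther ((List.range width.toNat).map (fun (k : Nat) => (k : Int))) [] c
      rw [List.foldl_map] at h2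
      simpa using h2
    simp only [hin]
    rw [pv_outerOther (width.toNat : Int) height.toNat [] 0]
    simp only [List.nil_append, Function.comp_def, pv_slice_nil]
    rw [List.map_const']
    simp
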